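-- pv_equiv track=rewrite | github.com/yarrs786/PiKYAP | RK2/rk2.py | task_g3
-- ===== SOURCE A (Python) =====
-- from operator import itemgetter
--
-- def task_g3(many_to_many, tables):
--     table_groups = {}
--     for row_name, _, table_name in many_to_many:
--         if table_name not in table_groups:
--             table_groups[table_name] = []
--         if row_name not in table_groups[table_name]:
--             table_groups[table_name].append(row_name)
--
--     return dict(sorted(table_groups.items(), key=itemgetter(0)))
-- ===== SOURCE B (Python) =====
-- def task_g3(many_to_many, tables):
--     # No grouping dict: compute the sorted set of table names first, then for
--     # each table make one scan over the input collecting its row names (first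
--     # occurrences only).
--     result = {}
--     for t in sorted({row[2] for row in many_to_many}):
--         names = []
--         for row_name, _, table_name in many_to_many:
--             if table_name == t and row_name not in names:
--                 names.append(row_name)
--         result[t] = names
--     return result
-- ===== Notes on version B (the rewrite author's own statement) =====
-- stated objective: alternative
-- what changed: A builds a dict of deduplicated lists in one grouping pass and sorts its items at the end; B never groups: it first computes the sorted set of table names, then for each table performs its own full scan of the input collecting that table's row names, building the output directly in sorted key order.
import Mathlib
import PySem

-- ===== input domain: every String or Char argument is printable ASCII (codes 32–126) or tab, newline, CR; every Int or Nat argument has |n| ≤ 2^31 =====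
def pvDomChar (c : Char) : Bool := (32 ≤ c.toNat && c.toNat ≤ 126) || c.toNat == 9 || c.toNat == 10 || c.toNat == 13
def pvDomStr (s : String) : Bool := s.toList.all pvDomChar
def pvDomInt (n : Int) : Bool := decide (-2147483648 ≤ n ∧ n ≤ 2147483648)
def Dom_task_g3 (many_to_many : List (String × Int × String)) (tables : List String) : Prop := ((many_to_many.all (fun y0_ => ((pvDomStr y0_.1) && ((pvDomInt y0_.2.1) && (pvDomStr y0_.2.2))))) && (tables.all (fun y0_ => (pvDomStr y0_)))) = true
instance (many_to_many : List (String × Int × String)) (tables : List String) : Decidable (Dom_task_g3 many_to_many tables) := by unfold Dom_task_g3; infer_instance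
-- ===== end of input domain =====

-- B drops A's grouping dict entirely: it computes the sorted set of table names and then makes
-- one full scan of the input per table, building the result directly in sorted key order.

-- ===== PORT A =====
-- one iteration of A's loop: ensure the key exists, then append row_name only if not already present
def stepA_g3 (d : PySem.Dict String (List String)) (r : String × Int × String) : PySem.Dict String (List String) :=
  let d1 := if d.contains r.2.2 then d else d.insert r.2.2 []
  if (d1.getD r.2.2 []).contains r.1 then d1
  else d1.insert r.2.2 (d1.getD r.2.2 [] ++ [r.1])

-- dict(sorted(tg.items(), key=itemgetter(0))): the sorted items have distinct keys, so the
-- resulting dict IS that sorted association list.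
def task_g3 (many_to_many : List (String × Int × String)) (tables : List String) : List (String × List String) :=
  let table_groups := many_to_many.foldl stepA_g3 PySem.Dict.empty
  PySem.List.sorted table_groups.items (fun p => p.1) false

-- ===== PORT B =====
-- B's inner loop: one scan of many_to_many collecting table t's row names (first occurrences)
def collect_g3 (many_to_many : List (String × Int × String)) (t : String) : List String :=
  many_to_many.foldl
    (fun names r => if r.2.2 == t && !names.contains r.1 then names ++ [r.1] else names) []

-- the outer loop inserts distinct keys in sorted order into the fresh result dict,
-- so that dict IS this association list.
def task_g3_alt (many_to_many : List (String × Int × String)) (tables : List String) : List (String × List String) :=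
  (PySem.List.sorted (PySem.Set.ofList (many_to_many.map (fun r => r.2.2))) (fun t => t) false).map
    (fun t => (t, collect_g3 many_to_many t))

-- ===== PRECONDITION & SPEC =====
def Spec_task_g3 (many_to_many : List (String × Int × String)) (tables : List String) (out : List (String × List String)) : Prop := out = task_g3_alt many_to_many tables
instance (many_to_many : List (String × Int × String)) (tables : List String) (out : List (String × List String)) : Decidable (Spec_task_g3 many_to_many tables out) := by unfold Spec_task_g3; infer_instance

-- ===== CLAIM =====
def Claim_equal_task_g3 : Prop := ∀ (many_to_many : List (String × Int × String)) (tables : List String), Dom_task_g3 many_to_many tables → Spec_task_g3 many_to_many tables (task_g3 many_to_many tables)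

-- ===== LEMMAS AND PROOFS =====

-- A's fold keeps the set of table names seen so far as its key list
lemma keys_stepA (d : PySem.Dict String (List String)) (r : String × Int × String) :
    (stepA_g3 d r).keys = PySem.Set.add d.keys r.2.2 := by
  unfold stepA_g3
  by_cases hc : d.contains r.2.2
  · have hmem : r.2.2 ∈ d.keys := (PySem.Dict.contains_iff_mem_keys d _).mp hc
    have hadd : PySem.Set.add d.keys r.2.2 = d.keys := PySem.Set.add_of_mem hmem
    simp only [hc, if_true, hadd]
    split
    · rfl
    · exact PySem.Dict.keys_insert_of_contains d _ hc
  · have hcb : d.contains r.2.2 = false := by simpa using hc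
    have hmem : r.2.2 ∉ d.keys := fun h => hc ((PySem.Dict.contains_iff_mem_keys d _).mpr h)
    have hadd : PySem.Set.add d.keys r.2.2 = d.keys ++ [r.2.2] := PySem.Set.add_of_not_mem hmem
    simp only [hcb, Bool.false_eq_true, if_false, hadd]
    split
    · exact PySem.Dict.keys_insert_of_not_contains d _ hcb
    · rw [PySem.Dict.keys_insert_of_contains _ _ (PySem.Dict.contains_insert_self d _ _),
          PySem.Dict.keys_insert_of_not_contains d _ hcb]

lemma keys_foldA (mm : List (String × Int × String)) (d : PySem.Dict String (List String)) :
    (mm.foldl stepA_g3 d).keys = mm.foldl (fun s r => PySem.Set.add s r.2.2) d.keys := by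
  induction mm generalizing d with
  | nil => rfl
  | cons r rs ih => rw [List.foldl_cons, List.foldl_cons, ih, keys_stepA]

-- A's value at any table t is exactly B's inner scan starting from the stored list
lemma getD_stepA (d : PySem.Dict String (List String)) (r : String × Int × String) (t : String) :
    (stepA_g3 d r).getD t [] =
      (if r.2.2 == t && !(d.getD t []).contains r.1 then d.getD t [] ++ [r.1] else d.getD t []) := by
  by_cases hc : d.contains r.2.2
  · simp only [stepA_g3, hc, if_true]
    by_cases ht : r.2.2 = t
    · subst ht
      by_cases hm : r.1 ∈ d.getD r.2.2 []
      · simp [hm]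
      · simp [hm, PySem.Dict.getD_insert_self]
    · have hne : (r.2.2 == t) = false := by simpa using ht
      have htne : t ≠ r.2.2 := fun h => ht h.symm
      simp only [hne, Bool.false_and, Bool.false_eq_true, if_false]
      split
      · rfl
      · exact PySem.Dict.getD_insert_of_ne _ _ _ htne
  · have hcb : d.contains r.2.2 = false := by simpa using hc
    have hget : d.getD r.2.2 [] = ([] : List String) :=
      PySem.Dict.getD_of_not_contains d [] hcb
    simp only [stepA_g3, hcb, Bool.false_eq_true, if_false, PySem.Dict.getD_insert_self,
      List.contains_nil, List.nil_append,
      PySem.Dict.insert_insert_self]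
    by_cases ht : r.2.2 = t
    · subst ht
      simp [PySem.Dict.getD_insert_self, hget]
    · have hne : (r.2.2 == t) = false := by simpa using ht
      have htne : t ≠ r.2.2 := fun h => ht h.symm
      simp only [hne, Bool.false_and, Bool.false_eq_true, if_false]
      exact PySem.Dict.getD_insert_of_ne _ _ _ htne

lemma getD_foldA (mm : List (String × Int × String)) (d : PySem.Dict String (List String)) (t : String) :
    (mm.foldl stepA_g3 d).getD t [] =
      mm.foldl (fun names r => if r.2.2 == t && !names.contains r.1 then names ++ [r.1] else names)
        (d.getD t []) := by
  induction mm generalizing d with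
  | nil => rfl
  | cons r rs ih => rw [List.foldl_cons, List.foldl_cons, ih, getD_stepA]

-- sorting key-tagged pairs by fst = sorting the keys, then tagging
lemma insertBy_mapg (hf : String → List String) (x : String) (l : List String) :
    PySem.List.insertBy (fun a b => decide (a.1 < b.1)) (x, hf x)
        (l.map (fun k => (k, hf k)))
      = (PySem.List.insertBy (fun a b => decide (a < b)) x l).map (fun k => (k, hf k)) := by
  induction l with
  | nil => simp [PySem.List.insertBy]
  | cons y ys ih =>
    simp only [List.map_cons, PySem.List.insertBy]
    by_cases h : x < y
    · rw [if_pos (by simpa using h), if_pos (by simpa using h)]; simp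
    · rw [if_neg (by simpa using h), if_neg (by simpa using h), ih, List.map_cons]

lemma sorted_fst_map (hf : String → List String) (l : List String) :
    PySem.List.sorted (l.map (fun k => (k, hf k))) (fun p => p.1) false
      = (PySem.List.sorted l (fun t => t) false).map (fun k => (k, hf k)) := by
  rw [PySem.List.sorted_eq_foldl_insertBy, PySem.List.sorted_eq_foldl_insertBy, List.foldl_map]
  have key : ∀ (ls acc : List String),
      ls.foldl (fun a k => PySem.List.insertBy (fun p q => decide (p.1 < q.1)) (k, hf k) a)
          (acc.map (fun k => (k, hf k)))
        = (ls.foldl (fun a k => PySem.List.insertBy (fun a b => decide (a < b)) k a) acc).map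
            (fun k => (k, hf k)) := by
    intro ls
    induction ls with
    | nil => intro acc; rfl
    | cons y ys ih =>
      intro acc
      rw [List.foldl_cons, List.foldl_cons, insertBy_mapg]
      exact ih _
  exact key l []

-- ===== VERDICT =====
theorem task_g3_spec : Claim_equal_task_g3 := by
  intro mm tables _
  simp only [Spec_task_g3, task_g3, task_g3_alt]
  set dA := mm.foldl stepA_g3 PySem.Dict.empty with hdA
  have hkeys : dA.keys = PySem.Set.ofList (mm.map (fun r => r.2.2)) := by
    rw [hdA, keys_foldA, PySem.Set.ofList_eq_foldl, List.foldl_map]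
    rfl
  have hnd : dA.keys.Nodup := by rw [hkeys]; exact PySem.Set.nodup_ofList _
  rw [PySem.Dict.items_eq_map_keys dA hnd ([] : List String),
      sorted_fst_map (fun k => dA.getD k []) dA.keys, hkeys]
  apply List.map_congr_left
  intro t _
  have : dA.getD t [] = collect_g3 mm t := by
    rw [hdA, getD_foldA]
    rfl
  rw [this]
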